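-- pv_equiv track=rewrite | github.com/Moatasem-b/FP-Growth | fp_tree.py | _calculate_items_support
-- ===== SOURCE A (Python) =====
-- def _calculate_items_support(transactions):
--     items_support = {}
--
--     for transaction in transactions:
--         items = set()
--         i = 0
--
--         while i < len(transaction):
--             item = transaction[i]
--
--             if item not in items:
--                 items.add(item)
--
--                 if item in items_support:
--                     items_support[item] += 1
--                 else:
--                     items_support[item] = 1
--                 i += 1
--             else:
--                 transaction.pop(i)
--
--     return items_support
-- ===== SOURCE B (Python) =====
-- def _calculate_items_support(transactions):
--     # Pass 1: dedup each transaction in place (first occurrences, same mutation as A's pop loop).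
--     for transaction in transactions:
--         transaction[:] = list(dict.fromkeys(transaction))
--
--     # Pass 2: count support over the now-duplicate-free transactions.
--     items_support = {}
--     for transaction in transactions:
--         for item in transaction:
--             items_support[item] = items_support.get(item, 0) + 1
--
--     return items_support
-- ===== Notes on version B (the rewrite author's own statement) =====
-- stated objective: simpler
-- what changed: Replaces A's interleaved while/pop loop (which dedups and counts in one mutating scan per transaction) with two separate passes: an in-place dedup via dict.fromkeys slice assignment, then a plain nested counting loop with dict.get.
import Mathlib
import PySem

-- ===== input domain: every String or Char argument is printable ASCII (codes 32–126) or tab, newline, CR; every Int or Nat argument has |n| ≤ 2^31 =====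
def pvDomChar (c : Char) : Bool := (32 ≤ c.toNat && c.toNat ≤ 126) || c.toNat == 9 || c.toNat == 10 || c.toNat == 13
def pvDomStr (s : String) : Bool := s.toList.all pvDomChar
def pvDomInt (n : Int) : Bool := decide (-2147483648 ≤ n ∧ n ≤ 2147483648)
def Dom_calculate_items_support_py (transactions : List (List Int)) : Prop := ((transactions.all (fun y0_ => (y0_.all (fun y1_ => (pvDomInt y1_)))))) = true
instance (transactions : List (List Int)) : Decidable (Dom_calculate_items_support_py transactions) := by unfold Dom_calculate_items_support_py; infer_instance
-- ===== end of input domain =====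

-- B replaces A's interleaved while/pop dedup-and-count loop by two separate passes
-- (in-place dedup, then a plain counting loop); equal return value, same in-place
-- dedup mutation of each transaction (mutation itself is not modelled here).

-- ===== PORT A =====
-- A's inner while loop: index i advances on a fresh item, pop(i) on a duplicate;
-- the remaining suffix shrinks either way, so it is structural recursion on the suffix.
def aLoop (items : PySem.Set Int) (d : PySem.Dict Int Int) : List Int → PySem.Dict Int Int
  | [] => d
  | x :: rest =>
    if PySem.Set.contains items x then
      -- item in items: transaction.pop(i)
      aLoop items d rest
    else
      -- fresh item: items.add(item); count it
      aLoop (PySem.Set.add items x)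
        (if d.contains x then d.insert x (d.getD x 0 + 1) else d.insert x 1) rest

def calculate_items_support_py (transactions : List (List Int)) : List (Int × Int) :=
  (transactions.foldl (fun d t => aLoop PySem.Set.empty d t) PySem.Dict.empty).items

-- ===== PORT B =====
def calculate_items_support_py_alt (transactions : List (List Int)) : List (Int × Int) :=
  -- pass 1: transaction[:] = list(dict.fromkeys(transaction))
  let deduped := transactions.map PySem.List.dedup
  -- pass 2: items_support[item] = items_support.get(item, 0) + 1
  (deduped.foldl
    (fun d t => t.foldl (fun d x => d.insert x (d.getD x 0 + 1)) d)
    PySem.Dict.empty).items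

-- ===== PRECONDITION & SPEC =====
def Spec_calculate_items_support_py (transactions : List (List Int)) (out : List (Int × Int)) : Prop := out = calculate_items_support_py_alt transactions
instance (transactions : List (List Int)) (out : List (Int × Int)) : Decidable (Spec_calculate_items_support_py transactions out) := by unfold Spec_calculate_items_support_py; infer_instance

-- ===== CLAIM (what is proved, stated in full; the proofs are below) =====
def Claim_equal_calculate_items_support_py : Prop := ∀ (transactions : List (List Int)), Dom_calculate_items_support_py transactions → Spec_calculate_items_support_py transactions (calculate_items_support_py transactions)

-- ===== LEMMAS AND PROOFS =====

-- The fresh items A's inner loop encounters, in order (with the already-seen set threaded).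
def newElems (items : PySem.Set Int) : List Int → List Int
  | [] => []
  | x :: rest =>
    if PySem.Set.contains items x then newElems items rest
    else x :: newElems (PySem.Set.add items x) rest

-- A's counting step is B's counting step.
theorem aStep_eq (d : PySem.Dict Int Int) (x : Int) :
    (if d.contains x then d.insert x (d.getD x 0 + 1) else d.insert x 1)
      = d.insert x (d.getD x 0 + 1) := by
  by_cases h : d.contains x = true
  · simp only [h, if_true]
  · simp only [Bool.not_eq_true] at h
    rw [if_neg (by simp [h]), PySem.Dict.getD_of_not_contains d 0 h]
    norm_num

theorem aLoop_eq_foldl (xs : List Int) : ∀ (items : PySem.Set Int) (d : PySem.Dict Int Int),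
    aLoop items d xs = (newElems items xs).foldl (fun d x => d.insert x (d.getD x 0 + 1)) d := by
  induction xs with
  | nil => intro items d; simp [aLoop, newElems]
  | cons x rest ih =>
    intro items d
    by_cases h : PySem.Set.contains items x = true
    · simp only [aLoop, newElems, h, if_true]
      exact ih items d
    · simp only [Bool.not_eq_true] at h
      simp only [aLoop, newElems, h, Bool.false_eq_true, if_false, List.foldl_cons]
      rw [aStep_eq, ih]

theorem update_eq_append_newElems (xs : List Int) : ∀ (items : PySem.Set Int),
    PySem.Set.update items xs = items ++ newElems items xs := by
  induction xs with
  | nil => intro items; simp [newElems, PySem.Set.update_nil]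
  | cons x rest ih =>
    intro items
    rw [PySem.Set.update_cons]
    by_cases h : PySem.Set.contains items x = true
    · have hx : x ∈ items := (PySem.Set.contains_iff _ _).mp h
      rw [PySem.Set.add_of_mem hx, ih]
      simp only [newElems, h, if_true]
    · simp only [Bool.not_eq_true] at h
      have hx : x ∉ items := by simpa using h
      rw [PySem.Set.add_of_not_mem hx, ih]
      simp only [newElems, h, Bool.false_eq_true, if_false, PySem.Set.add_of_not_mem hx,
        List.append_assoc, List.singleton_append]

theorem newElems_empty (xs : List Int) : newElems PySem.Set.empty xs = PySem.List.dedup xs := by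
  have h := update_eq_append_newElems xs PySem.Set.empty
  simp only [PySem.Set.empty] at h
  rw [PySem.Set.update_nil_left] at h
  simpa [PySem.List.dedup_eq_ofList] using h.symm

theorem aLoop_eq_dedup_foldl (t : List Int) (d : PySem.Dict Int Int) :
    aLoop PySem.Set.empty d t
      = (PySem.List.dedup t).foldl (fun d x => d.insert x (d.getD x 0 + 1)) d := by
  rw [aLoop_eq_foldl, newElems_empty]

-- ===== VERDICT (by name: the statement is the Claim_ definition above) =====
theorem calculate_items_support_py_spec : Claim_equal_calculate_items_support_py := by
  intro transactions _
  unfold Spec_calculate_items_support_py calculate_items_support_py calculate_items_support_py_alt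
  dsimp only
  rw [List.foldl_map]
  congr 1
  exact PySem.List.foldl_congr_mem _ _ _ _ (fun d t _ => aLoop_eq_dedup_foldl t d)
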